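-- pv_equiv track=rewrite | github.com/fnilsen1/fnilsen1.github.io | Python/Alg Search/all_orientations.py | do_rotation
-- ===== SOURCE A (Python) =====
-- def do_rotation(m, rot):
--     if rot == "x":
--         m[0], m[1], m[4], m[5] = m[4].lower(), m[5].lower(), m[1].lower(), m[0].lower()
--     elif rot == "x'":
--         m[0], m[1], m[4], m[5] = m[5].lower(), m[4].lower(), m[0].lower(), m[1].lower()
--     elif rot == "x2":
--         m[0], m[1], m[4], m[5] = m[1].lower(), m[0].lower(), m[5].lower(), m[4].lower()
--     elif rot == "y":
--         m[2], m[3], m[4], m[5] = m[5].lower(), m[4].lower(), m[2].lower(), m[3].lower()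
--     elif rot == "y'":
--         m[2], m[3], m[4], m[5] = m[4].lower(), m[5].lower(), m[3].lower(), m[2].lower()
--     elif rot == "y2":
--         m[2], m[3], m[4], m[5] = m[3].lower(), m[2].lower(), m[5].lower(), m[4].lower()
--     elif rot == "z":
--         m[0], m[1], m[2], m[3] = m[3].lower(), m[2].lower(), m[0].lower(), m[1].lower()
--     elif rot == "z'":
--         m[0], m[1], m[2], m[3] = m[2].lower(), m[3].lower(), m[1].lower(), m[0].lower()
--     elif rot == "z2":
--         m[0], m[1], m[2], m[3] = m[1].lower(), m[0].lower(), m[3].lower(), m[2].lower()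
--
--     # Convert lower cases back to upper case
--     return [x.upper() for x in m]
-- ===== SOURCE B (Python) =====
-- # Generator-power rewrite: rot is parsed as axis + turn count; one quarter-turn
-- # generator per axis is iterated, instead of enumerating all nine rotations.
-- # (A also lowercases four slots of m in place; B leaves m untouched -- the
-- # equivalence is about the return value.)
-- _BASE = {"x": {0: 4, 1: 5, 4: 1, 5: 0},
--          "y": {2: 5, 3: 4, 4: 2, 5: 3},
--          "z": {0: 3, 1: 2, 2: 0, 3: 1}}
-- _TURNS = {"": 1, "2": 2, "'": 3}
--
-- def do_rotation(m, rot):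
--     out = [x.upper() for x in m]
--     base = _BASE.get(rot[:1])
--     turns = _TURNS.get(rot[1:])
--     if base is not None and turns is not None:
--         for i in base:
--             s = i
--             for _ in range(turns):
--                 s = base[s]
--             out[i] = m[s].upper()
--     return out
-- ===== Notes on version B (the rewrite author's own statement) =====
-- stated objective: alternative
-- what changed: Instead of nine hard-coded four-way tuple-assignment branches, B parses rot into an axis and a turn count, keeps only one quarter-turn generator permutation per axis, and obtains the rotation by iterating that generator turn-count times (index chasing), then writes the four moved entries into the uppercased copy.
import Mathlib
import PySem

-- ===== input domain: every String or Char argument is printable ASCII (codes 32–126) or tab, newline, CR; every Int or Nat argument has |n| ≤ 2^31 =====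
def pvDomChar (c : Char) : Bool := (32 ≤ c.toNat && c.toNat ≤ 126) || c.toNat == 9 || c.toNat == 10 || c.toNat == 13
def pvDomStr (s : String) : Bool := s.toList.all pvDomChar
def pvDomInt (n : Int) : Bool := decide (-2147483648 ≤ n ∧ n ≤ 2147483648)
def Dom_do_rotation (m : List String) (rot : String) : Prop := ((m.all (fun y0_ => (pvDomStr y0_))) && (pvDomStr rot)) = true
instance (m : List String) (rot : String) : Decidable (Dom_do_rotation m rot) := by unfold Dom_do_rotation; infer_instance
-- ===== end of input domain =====

-- B parses rot into axis + turn count and iterates one quarter-turn generator per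
-- axis instead of enumerating nine branches (alternative decomposition); A also
-- lowercases four slots of m in place, B does not mutate m -- the theorems below
-- are about the return value only.


-- ===== PORT A =====
def do_rotation (m : List String) (rot : String) : List String :=
  -- g i = m[i] for the literal non-negative indices A uses; exact when i < m.length,
  -- which Pre_ guarantees for every index each rotation code touches (elsewhere Python raises).
  let g : Nat → String := fun i => m.getD i ""
  let mm :=
    if rot = "x" then
      ((((m.set 0 (PySem.Str.lower (g 4))).set 1 (PySem.Str.lower (g 5))).set 4 (PySem.Str.lower (g 1))).set 5 (PySem.Str.lower (g 0)))
    else if rot = "x'" then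
      ((((m.set 0 (PySem.Str.lower (g 5))).set 1 (PySem.Str.lower (g 4))).set 4 (PySem.Str.lower (g 0))).set 5 (PySem.Str.lower (g 1)))
    else if rot = "x2" then
      ((((m.set 0 (PySem.Str.lower (g 1))).set 1 (PySem.Str.lower (g 0))).set 4 (PySem.Str.lower (g 5))).set 5 (PySem.Str.lower (g 4)))
    else if rot = "y" then
      ((((m.set 2 (PySem.Str.lower (g 5))).set 3 (PySem.Str.lower (g 4))).set 4 (PySem.Str.lower (g 2))).set 5 (PySem.Str.lower (g 3)))
    else if rot = "y'" then
      ((((m.set 2 (PySem.Str.lower (g 4))).set 3 (PySem.Str.lower (g 5))).set 4 (PySem.Str.lower (g 3))).set 5 (PySem.Str.lower (g 2)))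
    else if rot = "y2" then
      ((((m.set 2 (PySem.Str.lower (g 3))).set 3 (PySem.Str.lower (g 2))).set 4 (PySem.Str.lower (g 5))).set 5 (PySem.Str.lower (g 4)))
    else if rot = "z" then
      ((((m.set 0 (PySem.Str.lower (g 3))).set 1 (PySem.Str.lower (g 2))).set 2 (PySem.Str.lower (g 0))).set 3 (PySem.Str.lower (g 1)))
    else if rot = "z'" then
      ((((m.set 0 (PySem.Str.lower (g 2))).set 1 (PySem.Str.lower (g 3))).set 2 (PySem.Str.lower (g 1))).set 3 (PySem.Str.lower (g 0)))
    else if rot = "z2" then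
      ((((m.set 0 (PySem.Str.lower (g 1))).set 1 (PySem.Str.lower (g 0))).set 2 (PySem.Str.lower (g 3))).set 3 (PySem.Str.lower (g 2)))
    else m
  mm.map PySem.Str.upper

-- ===== PORT B =====
def pvBase : PySem.Dict String (PySem.Dict Int Int) :=
  PySem.Dict.ofList
    [("x", PySem.Dict.ofList [(0, 4), (1, 5), (4, 1), (5, 0)]),
     ("y", PySem.Dict.ofList [(2, 5), (3, 4), (4, 2), (5, 3)]),
     ("z", PySem.Dict.ofList [(0, 3), (1, 2), (2, 0), (3, 1)])]

def pvTurns : PySem.Dict String Int :=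
  PySem.Dict.ofList [("", 1), ("2", 2), ("'", 3)]

def do_rotation_alt (m : List String) (rot : String) : List String :=
  let out := m.map PySem.Str.upper
  match PySem.Dict.get? pvBase (PySem.Str.slice rot none (some 1)),
        PySem.Dict.get? pvTurns (PySem.Str.slice rot (some 1) none) with
  | some base, some turns =>
      -- for i in base: s = i; for _ in range(turns): s = base[s]; out[i] = m[s].upper()
      -- base[s]: s is always a key of base (base is closed on its keys), so getD is exact;
      -- out[i] = ...: i is a table literal inside Pre_'s length bound, so List.set is exact,
      -- and m[s] is in range there too, so .getD "" after pyGet? is exact.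
      (PySem.Dict.keys base).foldl (fun out i =>
        let s := (PySem.List.pyRange 0 turns 1).foldl
                   (fun s _ => PySem.Dict.getD base s s) i
        out.set i.toNat (PySem.Str.upper ((PySem.List.pyGet? m s).getD ""))) out
  | _, _ => out

-- ===== PRECONDITION & SPEC =====
-- On the six x/y rotation codes Python A reads m[4]/m[5] and raises IndexError when m
-- has fewer than 6 entries; on the three z codes it reads m[3] and raises below 4
-- entries. Pre_ excludes exactly those raising inputs.
def Pre_do_rotation (m : List String) (rot : String) : Prop :=
  ((rot = "x" ∨ rot = "x'" ∨ rot = "x2" ∨ rot = "y" ∨ rot = "y'" ∨ rot = "y2") → 6 ≤ m.length) ∧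
  ((rot = "z" ∨ rot = "z'" ∨ rot = "z2") → 4 ≤ m.length)
instance (m : List String) (rot : String) : Decidable (Pre_do_rotation m rot) := by
  unfold Pre_do_rotation; infer_instance

def pvWitness_do_rotation : List String × String :=
  (["U", "F", "R", "B", "L", "D"], "x")

def Spec_do_rotation (m : List String) (rot : String) (out : List String) : Prop := out = do_rotation_alt m rot
instance (m : List String) (rot : String) (out : List String) : Decidable (Spec_do_rotation m rot out) := by unfold Spec_do_rotation; infer_instance

-- ===== CLAIM =====
def Claim_equal_do_rotation : Prop := ∀ (m : List String) (rot : String), Dom_do_rotation m rot → Pre_do_rotation m rot → Spec_do_rotation m rot (do_rotation m rot)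

-- ===== LEMMAS AND PROOFS =====

theorem upperChar_lowerChar (c : Char) :
    PySem.Chars.upperChar (PySem.Chars.lowerChar c) = PySem.Chars.upperChar c := by
  have hle : ∀ a b : Char, (a ≤ b) ↔ a.toNat ≤ b.toNat := fun _ _ => Iff.rfl
  unfold PySem.Chars.lowerChar
  by_cases h : PySem.Chars.isupper c = true
  · have hb : 65 ≤ c.toNat ∧ c.toNat ≤ 90 := by
      unfold PySem.Chars.isupper at h
      simpa only [Bool.and_eq_true, decide_eq_true_eq, hle] using h
    have hval : (c.toNat + 32).isValidChar := by constructor; omega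
    have htn : (Char.ofNat (c.toNat + 32)).toNat = c.toNat + 32 := by
      simp [Char.toNat_ofNat, hval]
    simp only [h, if_true]
    unfold PySem.Chars.upperChar PySem.Chars.islower
    have h97 : ('a' : Char).toNat = 97 := rfl
    have h122 : ('z' : Char).toNat = 122 := rfl
    simp only [Bool.and_eq_true, decide_eq_true_eq, hle, htn, h97, h122]
    rw [if_pos (by omega), if_neg (by omega)]
    rw [show c.toNat + 32 - 32 = c.toNat by omega, Char.ofNat_toNat]
  · simp [h]

theorem upper_lower (s : String) :
    PySem.Str.upper (PySem.Str.lower s) = PySem.Str.upper s := by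
  unfold PySem.Str.upper
  rw [PySem.Str.toList_lower]
  unfold PySem.Chars.upper PySem.Chars.lower
  rw [List.map_map]
  congr 1
  exact List.map_congr_left (fun c _ => upperChar_lowerChar c)

theorem do_rotation_known6 (m : List String) (rot : String)
    (hr : rot = "x" ∨ rot = "x'" ∨ rot = "x2" ∨ rot = "y" ∨ rot = "y'" ∨ rot = "y2")
    (hlen : 6 ≤ m.length) :
    do_rotation m rot = do_rotation_alt m rot := by
  obtain ⟨a, b, c, d, e, f, t, rfl⟩ :
      ∃ a b c d e f t, m = a :: b :: c :: d :: e :: f :: t := by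
    match m, hlen with
    | a :: b :: c :: d :: e :: f :: t, _ => exact ⟨a, b, c, d, e, f, t, rfl⟩
  rcases hr with rfl | rfl | rfl | rfl | rfl | rfl
  · -- rot = "x"
    simp [do_rotation, do_rotation_alt,
      show PySem.Str.slice "x" none (some 1) = "x" from by decide,
      show PySem.Str.slice "x" (some 1) none = "" from by decide,
      show PySem.Dict.get? pvBase "x" = some (PySem.Dict.ofList [(0, 4), (1, 5), (4, 1), (5, 0)]) from by decide,
      show PySem.Dict.get? pvTurns "" = some 1 from by decide,
      show PySem.Dict.keys (PySem.Dict.ofList [((0 : Int), (4 : Int)), (1, 5), (4, 1), (5, 0)]) = [0, 1, 4, 5] from by decide,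
      show PySem.List.pyRange 0 1 1 = [0] from by decide,
      show PySem.Dict.getD (PySem.Dict.ofList [((0 : Int), (4 : Int)), (1, 5), (4, 1), (5, 0)]) 0 0 = 4 from by decide,
      show PySem.Dict.getD (PySem.Dict.ofList [((0 : Int), (4 : Int)), (1, 5), (4, 1), (5, 0)]) 1 1 = 5 from by decide,
      show PySem.Dict.getD (PySem.Dict.ofList [((0 : Int), (4 : Int)), (1, 5), (4, 1), (5, 0)]) 4 4 = 1 from by decide,
      show PySem.Dict.getD (PySem.Dict.ofList [((0 : Int), (4 : Int)), (1, 5), (4, 1), (5, 0)]) 5 5 = 0 from by decide,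
      List.foldl, PySem.List.pyGet?_of_nonneg, List.set, List.getD, upper_lower]
  · -- rot = "x\'"
    simp [do_rotation, do_rotation_alt,
      show PySem.Str.slice "x\'" none (some 1) = "x" from by decide,
      show PySem.Str.slice "x\'" (some 1) none = "\'" from by decide,
      show PySem.Dict.get? pvBase "x" = some (PySem.Dict.ofList [(0, 4), (1, 5), (4, 1), (5, 0)]) from by decide,
      show PySem.Dict.get? pvTurns "\'" = some 3 from by decide,
      show PySem.Dict.keys (PySem.Dict.ofList [((0 : Int), (4 : Int)), (1, 5), (4, 1), (5, 0)]) = [0, 1, 4, 5] from by decide,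
      show PySem.List.pyRange 0 3 1 = [0, 1, 2] from by decide,
      show PySem.Dict.getD (PySem.Dict.ofList [((0 : Int), (4 : Int)), (1, 5), (4, 1), (5, 0)]) 0 0 = 4 from by decide,
      show PySem.Dict.getD (PySem.Dict.ofList [((0 : Int), (4 : Int)), (1, 5), (4, 1), (5, 0)]) 1 1 = 5 from by decide,
      show PySem.Dict.getD (PySem.Dict.ofList [((0 : Int), (4 : Int)), (1, 5), (4, 1), (5, 0)]) 4 4 = 1 from by decide,
      show PySem.Dict.getD (PySem.Dict.ofList [((0 : Int), (4 : Int)), (1, 5), (4, 1), (5, 0)]) 5 5 = 0 from by decide,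
      List.foldl, PySem.List.pyGet?_of_nonneg, List.set, List.getD, upper_lower]
  · -- rot = "x2"
    simp [do_rotation, do_rotation_alt,
      show PySem.Str.slice "x2" none (some 1) = "x" from by decide,
      show PySem.Str.slice "x2" (some 1) none = "2" from by decide,
      show PySem.Dict.get? pvBase "x" = some (PySem.Dict.ofList [(0, 4), (1, 5), (4, 1), (5, 0)]) from by decide,
      show PySem.Dict.get? pvTurns "2" = some 2 from by decide,
      show PySem.Dict.keys (PySem.Dict.ofList [((0 : Int), (4 : Int)), (1, 5), (4, 1), (5, 0)]) = [0, 1, 4, 5] from by decide,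
      show PySem.List.pyRange 0 2 1 = [0, 1] from by decide,
      show PySem.Dict.getD (PySem.Dict.ofList [((0 : Int), (4 : Int)), (1, 5), (4, 1), (5, 0)]) 0 0 = 4 from by decide,
      show PySem.Dict.getD (PySem.Dict.ofList [((0 : Int), (4 : Int)), (1, 5), (4, 1), (5, 0)]) 1 1 = 5 from by decide,
      show PySem.Dict.getD (PySem.Dict.ofList [((0 : Int), (4 : Int)), (1, 5), (4, 1), (5, 0)]) 4 4 = 1 from by decide,
      show PySem.Dict.getD (PySem.Dict.ofList [((0 : Int), (4 : Int)), (1, 5), (4, 1), (5, 0)]) 5 5 = 0 from by decide,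
      List.foldl, PySem.List.pyGet?_of_nonneg, List.set, List.getD, upper_lower]
  · -- rot = "y"
    simp [do_rotation, do_rotation_alt,
      show PySem.Str.slice "y" none (some 1) = "y" from by decide,
      show PySem.Str.slice "y" (some 1) none = "" from by decide,
      show PySem.Dict.get? pvBase "y" = some (PySem.Dict.ofList [(2, 5), (3, 4), (4, 2), (5, 3)]) from by decide,
      show PySem.Dict.get? pvTurns "" = some 1 from by decide,
      show PySem.Dict.keys (PySem.Dict.ofList [((2 : Int), (5 : Int)), (3, 4), (4, 2), (5, 3)]) = [2, 3, 4, 5] from by decide,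
      show PySem.List.pyRange 0 1 1 = [0] from by decide,
      show PySem.Dict.getD (PySem.Dict.ofList [((2 : Int), (5 : Int)), (3, 4), (4, 2), (5, 3)]) 2 2 = 5 from by decide,
      show PySem.Dict.getD (PySem.Dict.ofList [((2 : Int), (5 : Int)), (3, 4), (4, 2), (5, 3)]) 3 3 = 4 from by decide,
      show PySem.Dict.getD (PySem.Dict.ofList [((2 : Int), (5 : Int)), (3, 4), (4, 2), (5, 3)]) 4 4 = 2 from by decide,
      show PySem.Dict.getD (PySem.Dict.ofList [((2 : Int), (5 : Int)), (3, 4), (4, 2), (5, 3)]) 5 5 = 3 from by decide,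
      List.foldl, PySem.List.pyGet?_of_nonneg, List.set, List.getD, upper_lower]
  · -- rot = "y\'"
    simp [do_rotation, do_rotation_alt,
      show PySem.Str.slice "y\'" none (some 1) = "y" from by decide,
      show PySem.Str.slice "y\'" (some 1) none = "\'" from by decide,
      show PySem.Dict.get? pvBase "y" = some (PySem.Dict.ofList [(2, 5), (3, 4), (4, 2), (5, 3)]) from by decide,
      show PySem.Dict.get? pvTurns "\'" = some 3 from by decide,
      show PySem.Dict.keys (PySem.Dict.ofList [((2 : Int), (5 : Int)), (3, 4), (4, 2), (5, 3)]) = [2, 3, 4, 5] from by decide,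
      show PySem.List.pyRange 0 3 1 = [0, 1, 2] from by decide,
      show PySem.Dict.getD (PySem.Dict.ofList [((2 : Int), (5 : Int)), (3, 4), (4, 2), (5, 3)]) 2 2 = 5 from by decide,
      show PySem.Dict.getD (PySem.Dict.ofList [((2 : Int), (5 : Int)), (3, 4), (4, 2), (5, 3)]) 3 3 = 4 from by decide,
      show PySem.Dict.getD (PySem.Dict.ofList [((2 : Int), (5 : Int)), (3, 4), (4, 2), (5, 3)]) 4 4 = 2 from by decide,
      show PySem.Dict.getD (PySem.Dict.ofList [((2 : Int), (5 : Int)), (3, 4), (4, 2), (5, 3)]) 5 5 = 3 from by decide,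
      List.foldl, PySem.List.pyGet?_of_nonneg, List.set, List.getD, upper_lower]
  · -- rot = "y2"
    simp [do_rotation, do_rotation_alt,
      show PySem.Str.slice "y2" none (some 1) = "y" from by decide,
      show PySem.Str.slice "y2" (some 1) none = "2" from by decide,
      show PySem.Dict.get? pvBase "y" = some (PySem.Dict.ofList [(2, 5), (3, 4), (4, 2), (5, 3)]) from by decide,
      show PySem.Dict.get? pvTurns "2" = some 2 from by decide,
      show PySem.Dict.keys (PySem.Dict.ofList [((2 : Int), (5 : Int)), (3, 4), (4, 2), (5, 3)]) = [2, 3, 4, 5] from by decide,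
      show PySem.List.pyRange 0 2 1 = [0, 1] from by decide,
      show PySem.Dict.getD (PySem.Dict.ofList [((2 : Int), (5 : Int)), (3, 4), (4, 2), (5, 3)]) 2 2 = 5 from by decide,
      show PySem.Dict.getD (PySem.Dict.ofList [((2 : Int), (5 : Int)), (3, 4), (4, 2), (5, 3)]) 3 3 = 4 from by decide,
      show PySem.Dict.getD (PySem.Dict.ofList [((2 : Int), (5 : Int)), (3, 4), (4, 2), (5, 3)]) 4 4 = 2 from by decide,
      show PySem.Dict.getD (PySem.Dict.ofList [((2 : Int), (5 : Int)), (3, 4), (4, 2), (5, 3)]) 5 5 = 3 from by decide,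
      List.foldl, PySem.List.pyGet?_of_nonneg, List.set, List.getD, upper_lower]

theorem do_rotation_known4 (m : List String) (rot : String)
    (hr : rot = "z" ∨ rot = "z'" ∨ rot = "z2") (hlen : 4 ≤ m.length) :
    do_rotation m rot = do_rotation_alt m rot := by
  obtain ⟨a, b, c, d, t, rfl⟩ : ∃ a b c d t, m = a :: b :: c :: d :: t := by
    match m, hlen with
    | a :: b :: c :: d :: t, _ => exact ⟨a, b, c, d, t, rfl⟩
  rcases hr with rfl | rfl | rfl
  · -- rot = "z"
    simp [do_rotation, do_rotation_alt,
      show PySem.Str.slice "z" none (some 1) = "z" from by decide,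
      show PySem.Str.slice "z" (some 1) none = "" from by decide,
      show PySem.Dict.get? pvBase "z" = some (PySem.Dict.ofList [(0, 3), (1, 2), (2, 0), (3, 1)]) from by decide,
      show PySem.Dict.get? pvTurns "" = some 1 from by decide,
      show PySem.Dict.keys (PySem.Dict.ofList [((0 : Int), (3 : Int)), (1, 2), (2, 0), (3, 1)]) = [0, 1, 2, 3] from by decide,
      show PySem.List.pyRange 0 1 1 = [0] from by decide,
      show PySem.Dict.getD (PySem.Dict.ofList [((0 : Int), (3 : Int)), (1, 2), (2, 0), (3, 1)]) 0 0 = 3 from by decide,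
      show PySem.Dict.getD (PySem.Dict.ofList [((0 : Int), (3 : Int)), (1, 2), (2, 0), (3, 1)]) 1 1 = 2 from by decide,
      show PySem.Dict.getD (PySem.Dict.ofList [((0 : Int), (3 : Int)), (1, 2), (2, 0), (3, 1)]) 2 2 = 0 from by decide,
      show PySem.Dict.getD (PySem.Dict.ofList [((0 : Int), (3 : Int)), (1, 2), (2, 0), (3, 1)]) 3 3 = 1 from by decide,
      List.foldl, PySem.List.pyGet?_of_nonneg, List.set, List.getD, upper_lower]
  · -- rot = "z\'"
    simp [do_rotation, do_rotation_alt,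
      show PySem.Str.slice "z\'" none (some 1) = "z" from by decide,
      show PySem.Str.slice "z\'" (some 1) none = "\'" from by decide,
      show PySem.Dict.get? pvBase "z" = some (PySem.Dict.ofList [(0, 3), (1, 2), (2, 0), (3, 1)]) from by decide,
      show PySem.Dict.get? pvTurns "\'" = some 3 from by decide,
      show PySem.Dict.keys (PySem.Dict.ofList [((0 : Int), (3 : Int)), (1, 2), (2, 0), (3, 1)]) = [0, 1, 2, 3] from by decide,
      show PySem.List.pyRange 0 3 1 = [0, 1, 2] from by decide,
      show PySem.Dict.getD (PySem.Dict.ofList [((0 : Int), (3 : Int)), (1, 2), (2, 0), (3, 1)]) 0 0 = 3 from by decide,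
      show PySem.Dict.getD (PySem.Dict.ofList [((0 : Int), (3 : Int)), (1, 2), (2, 0), (3, 1)]) 1 1 = 2 from by decide,
      show PySem.Dict.getD (PySem.Dict.ofList [((0 : Int), (3 : Int)), (1, 2), (2, 0), (3, 1)]) 2 2 = 0 from by decide,
      show PySem.Dict.getD (PySem.Dict.ofList [((0 : Int), (3 : Int)), (1, 2), (2, 0), (3, 1)]) 3 3 = 1 from by decide,
      List.foldl, PySem.List.pyGet?_of_nonneg, List.set, List.getD, upper_lower]
  · -- rot = "z2"
    simp [do_rotation, do_rotation_alt,
      show PySem.Str.slice "z2" none (some 1) = "z" from by decide,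
      show PySem.Str.slice "z2" (some 1) none = "2" from by decide,
      show PySem.Dict.get? pvBase "z" = some (PySem.Dict.ofList [(0, 3), (1, 2), (2, 0), (3, 1)]) from by decide,
      show PySem.Dict.get? pvTurns "2" = some 2 from by decide,
      show PySem.Dict.keys (PySem.Dict.ofList [((0 : Int), (3 : Int)), (1, 2), (2, 0), (3, 1)]) = [0, 1, 2, 3] from by decide,
      show PySem.List.pyRange 0 2 1 = [0, 1] from by decide,
      show PySem.Dict.getD (PySem.Dict.ofList [((0 : Int), (3 : Int)), (1, 2), (2, 0), (3, 1)]) 0 0 = 3 from by decide,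
      show PySem.Dict.getD (PySem.Dict.ofList [((0 : Int), (3 : Int)), (1, 2), (2, 0), (3, 1)]) 1 1 = 2 from by decide,
      show PySem.Dict.getD (PySem.Dict.ofList [((0 : Int), (3 : Int)), (1, 2), (2, 0), (3, 1)]) 2 2 = 0 from by decide,
      show PySem.Dict.getD (PySem.Dict.ofList [((0 : Int), (3 : Int)), (1, 2), (2, 0), (3, 1)]) 3 3 = 1 from by decide,
      List.foldl, PySem.List.pyGet?_of_nonneg, List.set, List.getD, upper_lower]

-- if B's base lookup succeeds, the first character of rot is an axis name
theorem base_key (s : String) (h : (PySem.Dict.get? pvBase s).isSome) :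
    s = "x" ∨ s = "y" ∨ s = "z" := by
  by_contra hc
  push Not at hc
  obtain ⟨n1, n2, n3⟩ := hc
  rw [show pvBase = PySem.Dict.mk
      [("x", PySem.Dict.mk [(0, 4), (1, 5), (4, 1), (5, 0)]),
       ("y", PySem.Dict.mk [(2, 5), (3, 4), (4, 2), (5, 3)]),
       ("z", PySem.Dict.mk [(0, 3), (1, 2), (2, 0), (3, 1)])] from by decide] at h
  simp [beq_iff_eq, Ne.symm n1, Ne.symm n2, Ne.symm n3, PySem.Dict.get?] at h

-- if B's turns lookup succeeds, the rest of rot is a turn-count suffix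
theorem turns_key (s : String) (h : (PySem.Dict.get? pvTurns s).isSome) :
    s = "" ∨ s = "2" ∨ s = "'" := by
  by_contra hc
  push Not at hc
  obtain ⟨n1, n2, n3⟩ := hc
  rw [show pvTurns = PySem.Dict.mk [("", 1), ("2", 2), ("'", 3)] from by decide] at h
  simp [beq_iff_eq, Ne.symm n1, Ne.symm n2, Ne.symm n3, PySem.Dict.get?] at h

-- a string is its first character followed by the rest: rot = rot[:1] ++ rot[1:]
theorem slice_recon (rot p q : String)
    (h1 : PySem.Str.slice rot none (some 1) = p)
    (h2 : PySem.Str.slice rot (some 1) none = q) :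
    rot = String.ofList (p.toList ++ q.toList) := by
  have t1 := congrArg String.toList h1
  rw [PySem.Str.toList_slice, PySem.Chars.slice_eq_listSlice,
    PySem.List.slice_to rot.toList ((by omega : (0 : Int) ≤ 1))] at t1
  have t2 := congrArg String.toList h2
  rw [PySem.Str.toList_slice, PySem.Chars.slice_eq_listSlice,
    PySem.List.slice_from rot.toList ((by omega : (0 : Int) ≤ 1))] at t2
  have ht : rot.toList = p.toList ++ q.toList := by
    rw [← t1, ← t2]
    simpa using (List.take_append_drop 1 rot.toList).symm
  have := congrArg String.ofList ht
  simpa using this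

-- ===== VERDICT =====
theorem do_rotation_spec : Claim_equal_do_rotation := by
  intro m rot _ hpre
  unfold Spec_do_rotation
  by_cases hr6 : rot = "x" ∨ rot = "x'" ∨ rot = "x2" ∨ rot = "y" ∨ rot = "y'" ∨ rot = "y2"
  · exact do_rotation_known6 m rot hr6 (hpre.1 hr6)
  · by_cases hr4 : rot = "z" ∨ rot = "z'" ∨ rot = "z2"
    · exact do_rotation_known4 m rot hr4 (hpre.2 hr4)
    · push Not at hr6 hr4
      obtain ⟨h1, h2, h3, h4, h5, h6⟩ := hr6
      obtain ⟨h7, h8, h9⟩ := hr4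
      have hA : do_rotation m rot = m.map PySem.Str.upper := by
        simp [do_rotation, h1, h2, h3, h4, h5, h6, h7, h8, h9]
      have hB : do_rotation_alt m rot = m.map PySem.Str.upper := by
        unfold do_rotation_alt
        rcases hcb : PySem.Dict.get? pvBase (PySem.Str.slice rot none (some 1)) with _ | base
        · simp
        · rcases hct : PySem.Dict.get? pvTurns (PySem.Str.slice rot (some 1) none) with _ | turns
          · simp
          · exfalso
            have hbk := base_key _ (by rw [hcb]; rfl)
            have htk := turns_key _ (by rw [hct]; rfl)
            rcases hbk with hb | hb | hb <;> rcases htk with ht | ht | ht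
            · exact h1 ((slice_recon rot "x" "" hb ht).trans (by decide))
            · exact h3 ((slice_recon rot "x" "2" hb ht).trans (by decide))
            · exact h2 ((slice_recon rot "x" "\'" hb ht).trans (by decide))
            · exact h4 ((slice_recon rot "y" "" hb ht).trans (by decide))
            · exact h6 ((slice_recon rot "y" "2" hb ht).trans (by decide))
            · exact h5 ((slice_recon rot "y" "\'" hb ht).trans (by decide))
            · exact h7 ((slice_recon rot "z" "" hb ht).trans (by decide))
            · exact h9 ((slice_recon rot "z" "2" hb ht).trans (by decide))
            · exact h8 ((slice_recon rot "z" "\'" hb ht).trans (by decide))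
      rw [hA, hB]
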